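-- pv_equiv track=rewrite | github.com/jgyy/python-bootcamp | 19/happy_numbers.py | print_happy_number
-- ===== SOURCE A (Python) =====
-- def get_digits(number):
--     """
--     get digits function
--     """
--     digits = []
--     while number:
--         digits.append(number % 10)
--         number //= 10
--     digits.reverse()
--     return digits
--
-- def is_happy_number(number):
--     """
--     check if the numner is happy
--     """
--     previous_numbers = []
--     while True:
--         digits = get_digits(number)
--         sum_of_squared_digits = sum(list(map(lambda x: x ** 2, digits)))
--         if sum_of_squared_digits == 1:
--             return True
--         if sum_of_squared_digits in previous_numbers:
--             return False
--         number = sum_of_squared_digits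
--         previous_numbers.append(number)
--
-- def print_happy_number(number):
--     """
--     print happy number function
--     """
--     happy_numbers = []
--     count = 0
--     while count < 8:
--         if is_happy_number(number):
--             happy_numbers.append(number)
--             count += 1
--         number += 1
--     return happy_numbers
-- ===== SOURCE B (Python) =====
-- def _step(n):
--     s = 0
--     while n:
--         d = n % 10
--         s += d * d
--         n //= 10
--     return s
--
-- def _is_happy(number):
--     slow = _step(number)
--     fast = _step(_step(number))
--     while fast != 1 and slow != fast:
--         slow = _step(slow)
--         fast = _step(_step(fast))
--     return fast == 1
--
-- def _collect(n, k):
--     if not k: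
--         return []
--     if _is_happy(n):
--         return [n] + _collect(n + 1, k - 1)
--     return _collect(n + 1, k)
--
-- def print_happy_number(number):
--     return _collect(number, 8)
-- ===== Notes on version B (the rewrite author's own statement) =====
-- stated objective: alternative
-- what changed: is_happy_number's growing seen-list cycle detection is replaced by Floyd's tortoise-and-hare with the digit-squares step computed by a direct accumulator loop (no digit list), and the outer while-count-accumulator loop is replaced by a recursive collector that conses each found happy number onto the recursive result while counting the remaining quota down.
import Mathlib
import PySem

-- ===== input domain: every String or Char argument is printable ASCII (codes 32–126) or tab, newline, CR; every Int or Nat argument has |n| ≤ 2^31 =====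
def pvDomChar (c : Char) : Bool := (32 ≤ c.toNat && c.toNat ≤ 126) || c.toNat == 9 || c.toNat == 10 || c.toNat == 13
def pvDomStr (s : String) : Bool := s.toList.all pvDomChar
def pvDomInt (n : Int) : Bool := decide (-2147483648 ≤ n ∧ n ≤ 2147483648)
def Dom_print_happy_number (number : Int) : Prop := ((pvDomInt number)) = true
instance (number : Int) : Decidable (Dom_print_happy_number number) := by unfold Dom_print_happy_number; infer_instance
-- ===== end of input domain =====

-- B replaces A's seen-list cycle detection by Floyd's tortoise-and-hare and the outer
-- count-up accumulator loop by a recursive collector that conses the remaining quota down.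

-- ===== PORT A =====
-- get_digits: `while number:` loop; fuel 64 is a totality guard only (every value reached
-- from an admitted input has at most 11 digits, so the loop always stops at number = 0 first).
def pvGetDigitsGo : Nat → Int → List Int → List Int
  | 0, _, acc => acc
  | f+1, n, acc =>
    if n = 0 then acc
    else pvGetDigitsGo f (PySem.Int.floordiv n 10) (acc ++ [PySem.Int.mod n 10])

def pvGetDigits (n : Int) : List Int := (pvGetDigitsGo 64 n []).reverse

-- is_happy_number's `while True:` loop; fuel 64 is a totality guard only (from every admitted
-- input the loop stops within 21 iterations, by the finite check proved below).
def pvIsHappyGoA : Nat → Int → List Int → Bool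
  | 0, _, _ => false
  | f+1, n, prev =>
    let s := ((pvGetDigits n).map (fun x => x ^ 2)).sum
    if s = 1 then true
    else if s ∈ prev then false
    else pvIsHappyGoA f s (prev ++ [s])

def pvIsHappyA (n : Int) : Bool := pvIsHappyGoA 64 n []

-- print_happy_number's `while count < 8:` loop; fuel 10^6 is a totality guard only.
def pvPrintGoA : Nat → Int → Int → List Int → List Int
  | 0, _, _, happy => happy
  | f+1, n, count, happy =>
    if count < 8 then
      if pvIsHappyA n then pvPrintGoA f (n+1) (count+1) (happy ++ [n])
      else pvPrintGoA f (n+1) count happy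
    else happy

def print_happy_number (number : Int) : List Int := pvPrintGoA 1000000 number 0 []

-- ===== PORT B =====
-- _step: digit-squares sum accumulated directly (no list); fuel 64 totality guard as above.
def pvStepGo : Nat → Int → Int → Int
  | 0, _, s => s
  | f+1, n, s =>
    if n = 0 then s
    else pvStepGo f (PySem.Int.floordiv n 10) (s + PySem.Int.mod n 10 * PySem.Int.mod n 10)

def pvStep (n : Int) : Int := pvStepGo 64 n 0

-- _is_happy: Floyd cycle detection; fuel 64 totality guard only (the loop stops within
-- 16 iterations from every admitted input, by the finite check proved below).
def pvFloydGo : Nat → Int → Int → Bool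
  | 0, _, _ => false
  | f+1, slow, fast =>
    if fast ≠ 1 ∧ slow ≠ fast then pvFloydGo f (pvStep slow) (pvStep (pvStep fast))
    else fast == 1

def pvIsHappyB (n : Int) : Bool := pvFloydGo 64 (pvStep n) (pvStep (pvStep n))

-- _collect: recursion on the remaining quota k, consing each found happy number onto the
-- recursive result; the fuel argument (one unit per increment of n) is a totality guard only.
def pvCollect : Nat → Int → Nat → List Int
  | 0, _, _ => []
  | _, _, 0 => []
  | f+1, n, k+1 =>
    if pvIsHappyB n then n :: pvCollect f (n+1) k
    else pvCollect f (n+1) (k+1)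

def print_happy_number_alt (number : Int) : List Int := pvCollect 1000000 number 8

-- ===== PRECONDITION & SPEC =====
-- A diverges on negative inputs (get_digits loops forever: number //= 10 stays at -1), so Pre_
-- admits exactly the nonnegative inputs, on which A returns normally.
def Pre_print_happy_number (number : Int) : Prop := 0 ≤ number
instance (number : Int) : Decidable (Pre_print_happy_number number) := by
  unfold Pre_print_happy_number; infer_instance
def pvWitness_print_happy_number : Int := (7)

def Spec_print_happy_number (number : Int) (out : List Int) : Prop := out = print_happy_number_alt number
instance (number : Int) (out : List Int) : Decidable (Spec_print_happy_number number out) := by unfold Spec_print_happy_number; infer_instance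

-- ===== CLAIM (what is proved, stated in full; the proofs are below) =====
def Claim_equal_print_happy_number : Prop := ∀ (number : Int), Dom_print_happy_number number → Pre_print_happy_number number → Spec_print_happy_number number (print_happy_number number)

-- ===== LEMMAS AND PROOFS =====

-- A's per-iteration digit-squares sum equals B's accumulator step (any Int input).
theorem step_eq_aux : ∀ (f : Nat) (n : Int) (acc : List Int),
    ((pvGetDigitsGo f n acc).map (fun x => x ^ 2)).sum
      = pvStepGo f n ((acc.map (fun x => x ^ 2)).sum) := by
  intro f
  induction f with
  | zero => intro n acc; simp [pvGetDigitsGo, pvStepGo]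
  | succ f ih =>
    intro n acc
    simp only [pvGetDigitsGo, pvStepGo]
    by_cases h : n = 0
    · simp [h]
    · simp only [h, if_false]
      rw [ih]
      congr 1
      simp [List.sum_append]
      ring

theorem stepA_eq_stepB (n : Int) :
    ((pvGetDigits n).map (fun x => x ^ 2)).sum = pvStep n := by
  have := step_eq_aux 64 n []
  simpa [pvGetDigits, pvStep, List.map_reverse, List.sum_reverse] using this

-- ---- Nat mirrors of the two happiness tests (kernel-fast; used only for the finite check) ----

def stepGoN (f : Nat) (n s : Nat) : Nat :=
  Nat.rec (motive := fun _ => Nat → Nat → Nat) (fun _ s => s)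
    (fun _ ih n s => if n = 0 then s else ih (n/10) (s + (n%10)*(n%10))) f n s

def stepN (n : Nat) : Nat := stepGoN 64 n 0

-- forces a Nat to literal form before the continuation (keeps kernel evaluation linear)
def forceN {α : Type} (n : Nat) (k : Nat → α) : α :=
  Nat.casesOn n (k 0) (fun m => k (m+1))

theorem forceN_eq {α : Type} (n : Nat) (k : Nat → α) : forceN n k = k n := by
  cases n <;> rfl

def happyGoN (f : Nat) (n : Nat) (prev : List Nat) : Bool :=
  Nat.rec (motive := fun _ => Nat → List Nat → Bool) (fun _ _ => false)
    (fun _ ih n prev =>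
      forceN (stepN n) (fun s =>
        if s = 1 then true else if s ∈ prev then false else ih s (prev ++ [s]))) f n prev

def floydGoN (f : Nat) (slow fast : Nat) : Bool :=
  Nat.rec (motive := fun _ => Nat → Nat → Bool) (fun _ _ => false)
    (fun _ ih slow fast =>
      if fast ≠ 1 ∧ slow ≠ fast then
        forceN (stepN slow) (fun sl => forceN (stepN (stepN fast)) (fun fa => ih sl fa))
      else fast == 1) f slow fast

theorem happyGoN_succ (f n : Nat) (prev : List Nat) :
    happyGoN (f+1) n prev
      = (if stepN n = 1 then true
         else if stepN n ∈ prev then false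
         else happyGoN f (stepN n) (prev ++ [stepN n])) := by
  have h : happyGoN (f+1) n prev
      = forceN (stepN n) (fun s =>
          if s = 1 then true else if s ∈ prev then false else happyGoN f s (prev ++ [s])) := rfl
  rw [h, forceN_eq]

theorem floydGoN_succ (f slow fast : Nat) :
    floydGoN (f+1) slow fast
      = (if fast ≠ 1 ∧ slow ≠ fast then floydGoN f (stepN slow) (stepN (stepN fast))
         else fast == 1) := by
  have h : floydGoN (f+1) slow fast
      = (if fast ≠ 1 ∧ slow ≠ fast then
           forceN (stepN slow) (fun sl => forceN (stepN (stepN fast)) (fun fa => floydGoN f sl fa))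
         else fast == 1) := rfl
  rw [h]
  split
  · rw [forceN_eq, forceN_eq]
  · rfl

-- cast bridges: the Int-level ports agree with the Nat mirrors on nonnegative values
theorem stepGo_cast : ∀ (f : Nat) (n s : Nat),
    pvStepGo f (n : Int) (s : Int) = ((stepGoN f n s : Nat) : Int) := by
  intro f
  induction f with
  | zero => intro n s; rfl
  | succ f ih =>
    intro n s
    show (if (n:Int) = 0 then (s:Int)
          else pvStepGo f (PySem.Int.floordiv n 10) ((s:Int) + PySem.Int.mod n 10 * PySem.Int.mod n 10))
        = _
    have hgo : stepGoN (f+1) n s = if n = 0 then s else stepGoN f (n/10) (s + (n%10)*(n%10)) := rfl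
    rw [hgo]
    by_cases h : n = 0
    · simp [h]
    · have h' : ¬ ((n:Int) = 0) := by exact_mod_cast h
      have hd : PySem.Int.floordiv (n:Int) 10 = ((n/10 : Nat) : Int) := by
        exact_mod_cast PySem.Int.floordiv_natCast n 10
      have hm : PySem.Int.mod (n:Int) 10 = ((n%10 : Nat) : Int) := by
        exact_mod_cast PySem.Int.mod_natCast n 10
      simp only [h, h', if_false]
      rw [hd, hm]
      rw [show ((s:Int) + ((n % 10 : Nat) : Int) * ((n % 10 : Nat) : Int))
            = (((s + (n%10)*(n%10) : Nat) : Nat) : Int) by push_cast; ring]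
      exact ih (n/10) (s + (n%10)*(n%10))

theorem step_cast (n : Nat) : pvStep (n : Int) = ((stepN n : Nat) : Int) := by
  have := stepGo_cast 64 n 0
  simpa [pvStep, stepN] using this

theorem floyd_cast : ∀ (f : Nat) (slow fast : Nat),
    pvFloydGo f (slow : Int) (fast : Int) = floydGoN f slow fast := by
  intro f
  induction f with
  | zero => intro slow fast; rfl
  | succ f ih =>
    intro slow fast
    rw [floydGoN_succ]
    have h : pvFloydGo (f+1) (slow : Int) (fast : Int)
        = (if (fast:Int) ≠ 1 ∧ (slow:Int) ≠ (fast:Int)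
           then pvFloydGo f (pvStep slow) (pvStep (pvStep fast)) else ((fast:Int) == 1)) := rfl
    rw [h]
    have hcond : ((fast:Int) ≠ 1 ∧ (slow:Int) ≠ (fast:Int)) ↔ (fast ≠ 1 ∧ slow ≠ fast) := by
      constructor <;> (intro hh; exact ⟨by exact_mod_cast hh.1, by exact_mod_cast hh.2⟩)
    by_cases hc : fast ≠ 1 ∧ slow ≠ fast
    · rw [if_pos (hcond.mpr hc), if_pos hc]
      rw [step_cast slow, step_cast fast, step_cast (stepN fast)]
      exact ih _ _
    · rw [if_neg (fun hh => hc (hcond.mp hh)), if_neg hc]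
      by_cases hf : fast = 1
      · subst hf; simp
      · have hf' : ¬ ((fast:Int) = 1) := by exact_mod_cast hf
        simp [hf, hf']

theorem happy_cast : ∀ (f : Nat) (n : Nat) (prev : List Nat),
    pvIsHappyGoA f (n : Int) (prev.map (fun x => (x : Int))) = happyGoN f n prev := by
  intro f
  induction f with
  | zero => intro n prev; rfl
  | succ f ih =>
    intro n prev
    rw [happyGoN_succ]
    have h : pvIsHappyGoA (f+1) (n : Int) (prev.map (fun x => (x : Int)))
        = (let s := ((pvGetDigits (n:Int)).map (fun x => x ^ 2)).sum
           if s = 1 then true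
           else if s ∈ prev.map (fun x => (x : Int)) then false
           else pvIsHappyGoA f s (prev.map (fun x => (x : Int)) ++ [s])) := rfl
    rw [h]
    simp only [stepA_eq_stepB, step_cast]
    have hmem : ((stepN n : Nat) : Int) ∈ prev.map (fun x => (x : Int)) ↔ stepN n ∈ prev := by
      simp
    have heq1 : (((stepN n : Nat) : Int) = 1) ↔ stepN n = 1 := by exact_mod_cast Iff.rfl
    by_cases h1 : stepN n = 1
    · rw [if_pos (heq1.mpr h1), if_pos h1]
    · rw [if_neg (fun hh => h1 (heq1.mp hh)), if_neg h1]
      by_cases h2 : stepN n ∈ prev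
      · rw [if_pos (hmem.mpr h2), if_pos h2]
      · rw [if_neg (fun hh => h2 (hmem.mp hh)), if_neg h2]
        rw [show prev.map (fun x => (x : Int)) ++ [((stepN n : Nat) : Int)]
              = (prev ++ [stepN n]).map (fun x => (x : Int)) by simp]
        exact ih (stepN n) (prev ++ [stepN n])

-- the Nat-level digit-squares bound: n < 10^d , d ≤ f  ⇒  stepGoN f n acc ≤ acc + 81*d
theorem stepGoN_bound : ∀ (d f : Nat) (n acc : Nat), n < 10^d → d ≤ f →
    stepGoN f n acc ≤ acc + 81 * d := by
  intro d
  induction d with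
  | zero =>
    intro f n acc h1 _
    have hn : n = 0 := by simpa using h1
    cases f with
    | zero => simp [stepGoN]
    | succ f => simp [stepGoN, hn]
  | succ d ih =>
    intro f n acc h1 hf
    cases f with
    | zero => omega
    | succ f =>
      have hgo : stepGoN (f+1) n acc
          = if n = 0 then acc else stepGoN f (n/10) (acc + (n%10)*(n%10)) := rfl
      rw [hgo]
      by_cases h : n = 0
      · simp [h]
      · simp only [h, if_false]
        have hpow : (10:Nat)^(d+1) = 10^d * 10 := by ring
        have hdm := Nat.div_add_mod n 10
        have hq : n/10 < 10^d := by rw [hpow] at h1; omega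
        have hr : (n%10)*(n%10) ≤ 81 := by
          have : n % 10 ≤ 9 := by omega
          calc (n%10)*(n%10) ≤ 9*9 := Nat.mul_le_mul this this
            _ ≤ 81 := by norm_num
        have := ih f (n/10) (acc + (n%10)*(n%10)) hq (by omega)
        omega

theorem stepN_le (n : Nat) (h : n < 10000000000) : stepN n ≤ 810 := by
  have h1 : n < 10^10 := by norm_num; omega
  have := stepGoN_bound 10 64 n 0 h1 (by norm_num)
  simpa [stepN] using this

-- the finite check: after one step both tests agree on every value in [0, 810]
def tailChk1 (s : Nat) : Bool :=
  (if s = 1 then true else happyGoN 63 s [s]) == floydGoN 64 s (stepN s)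

def tailChk : Nat → Bool :=
  Nat.rec true (fun m ih => tailChk1 m && ih)

set_option maxRecDepth 10000 in
theorem tailN : tailChk 811 = true := by decide

theorem tailN_spec : ∀ m : Nat, tailChk m = true → ∀ s : Nat, s < m → tailChk1 s = true := by
  intro m
  induction m with
  | zero => intro _ s h; omega
  | succ m ih =>
    intro h s hs
    have h' : (tailChk1 m && tailChk m) = true := h
    rw [Bool.and_eq_true] at h'
    rcases Nat.lt_succ_iff_lt_or_eq.mp hs with h2 | h2
    · exact ih h'.2 s h2
    · subst h2; exact h'.1

theorem isHappy_eq (n : Int) (h0 : 0 ≤ n) (h1 : n < 10000000000) :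
    pvIsHappyA n = pvIsHappyB n := by
  obtain ⟨m, rfl⟩ := Int.eq_ofNat_of_zero_le h0
  have hm : m < 10000000000 := by exact_mod_cast h1
  have hA : pvIsHappyA (m : Int) = happyGoN 64 m [] := by
    have := happy_cast 64 m []
    simpa [pvIsHappyA] using this
  have hB : pvIsHappyB (m : Int) = floydGoN 64 (stepN m) (stepN (stepN m)) := by
    unfold pvIsHappyB
    rw [step_cast m, step_cast (stepN m)]
    exact floyd_cast 64 (stepN m) (stepN (stepN m))
  rw [hA, hB]
  have hchk : tailChk1 (stepN m) = true :=
    tailN_spec 811 tailN (stepN m) (by have := stepN_le m hm; omega)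
  have h64 : happyGoN 64 m [] =
      (if stepN m = 1 then true else happyGoN 63 (stepN m) [stepN m]) := by
    rw [show (64:Nat) = 63+1 from rfl, happyGoN_succ]
    simp
  rw [h64]
  exact beq_iff_eq.mp hchk

-- the outer loops: A's count-up accumulator run equals the accumulator prefix followed by
-- B's cons-built collection of the remaining (8 - count) happy numbers, fuel in lockstep.
theorem outer_eq : ∀ (f : Nat) (n c : Int) (happy : List Int),
    0 ≤ n → n + (f:Int) ≤ 10000000000 →
    pvPrintGoA f n c happy = happy ++ pvCollect f n (8 - c).toNat := by
  intro f
  induction f with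
  | zero => intro n c happy _ _; simp [pvPrintGoA, pvCollect]
  | succ f ih =>
    intro n c happy h0 hb
    have hcast : ((f+1 : Nat) : Int) = (f:Int) + 1 := by push_cast; ring
    rw [hcast] at hb
    have hf0 : (0:Int) ≤ (f:Int) := Int.natCast_nonneg f
    by_cases hc : c < 8
    · obtain ⟨m, hm⟩ : ∃ m, (8 - c).toNat = m + 1 := ⟨(7 - c).toNat, by omega⟩
      rw [hm]
      simp only [pvPrintGoA, pvCollect, hc, if_true]
      rw [isHappy_eq n h0 (by omega)]
      by_cases hh : pvIsHappyB n = true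
      · rw [hh]
        simp only [if_true]
        rw [ih (n+1) (c+1) (happy ++ [n]) (by omega) (by omega)]
        rw [show (8 - (c+1)).toNat = m from by omega]
        simp
      · simp only [Bool.not_eq_true] at hh
        rw [hh]
        simp only [Bool.false_eq_true, if_false]
        rw [ih (n+1) c happy (by omega) (by omega), hm]
    · have h8 : (8 - c).toNat = 0 := by omega
      simp [pvPrintGoA, pvCollect, hc, h8]

-- ===== VERDICT (by name: the statement is the Claim_ definition above) =====
theorem print_happy_number_spec : Claim_equal_print_happy_number := by
  intro number hdom hpre
  unfold Spec_print_happy_number print_happy_number print_happy_number_alt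
  have hb : number ≤ 2147483648 := by
    unfold Dom_print_happy_number pvDomInt at hdom
    simpa using (of_decide_eq_true hdom).2
  have h := outer_eq 1000000 number 0 [] hpre (by push_cast; omega)
  simpa using h
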